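-- pv_equiv track=rewrite | github.com/shazzadD47/test | app/core/usage/helpers.py | find_best_matching_string
-- ===== SOURCE A (Python) =====
-- def find_best_matching_string(
--     model_name_to_match: str,
--     model_names_to_check: list[str],
-- ) -> str:
--     """
--     Find the best matching model name from a list of candidate model names.
--     It returns the string which matches the largest beginning of the model name
--     to match.
--
--     Args:
--         model_name_to_match (str): The model name to match.
--         model_names_to_check (list[str]): The list of candidate model names.
--
--     Returns:
--         str: The best matching model name.
--     """
--     best_match = ""
--     for candidate_model in model_names_to_check:
--         if model_name_to_match.startswith(candidate_model) and len(
--             candidate_model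
--         ) > len(best_match):
--             best_match = candidate_model
--     return best_match
-- ===== SOURCE B (Python) =====
-- def find_best_matching_string(
--     model_name_to_match: str,
--     model_names_to_check: list[str],
-- ) -> str:
--     candidates = set(model_names_to_check)
--     for length in range(len(model_name_to_match), -1, -1):
--         prefix = model_name_to_match[:length]
--         if prefix in candidates:
--             return prefix
--     return ""
-- ===== Notes on version B (the rewrite author's own statement) =====
-- stated objective: alternative
-- what changed: Instead of scanning the candidate list and tracking a running maximum, B builds a set of candidates once and tries the target's prefixes from longest to shortest, returning the first one found (prefixes of a given length are unique, so the longest matching candidate coincides).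
import Mathlib
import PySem

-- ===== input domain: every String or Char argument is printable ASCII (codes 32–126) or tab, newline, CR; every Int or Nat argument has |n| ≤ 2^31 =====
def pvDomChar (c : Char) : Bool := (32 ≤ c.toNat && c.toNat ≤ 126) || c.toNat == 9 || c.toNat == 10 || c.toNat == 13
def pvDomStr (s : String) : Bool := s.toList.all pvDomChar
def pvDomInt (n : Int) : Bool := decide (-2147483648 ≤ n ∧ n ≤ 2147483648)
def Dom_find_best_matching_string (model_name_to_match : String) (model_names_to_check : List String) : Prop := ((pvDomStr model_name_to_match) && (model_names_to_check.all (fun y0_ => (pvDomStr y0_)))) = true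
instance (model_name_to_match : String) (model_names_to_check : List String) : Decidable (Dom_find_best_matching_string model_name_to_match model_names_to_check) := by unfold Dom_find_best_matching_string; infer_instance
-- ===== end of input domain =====

-- B replaces A's list scan with a set of candidates probed by the target's prefixes, longest first (alternative decomposition; same result).


-- ===== PORT A =====
def find_best_matching_string (model_name_to_match : String) (model_names_to_check : List String) : String :=
  model_names_to_check.foldl
    (fun best_match candidate_model =>
      if PySem.Str.startswith model_name_to_match candidate_model
          && decide (PySem.Str.len best_match < PySem.Str.len candidate_model)
      then candidate_model else best_match)
    ""

-- ===== PORT B =====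
-- the for-loop over range(len(m), -1, -1) with early return, as downward recursion on the length
def fbmsAltGo (model_name_to_match : String) (candidates : PySem.Set String) : Nat → String
  | 0 =>
    let prefixStr := PySem.Str.slice model_name_to_match none (some ((0 : Nat) : Int))
    if PySem.Set.contains candidates prefixStr then prefixStr else ""
  | k + 1 =>
    let prefixStr := PySem.Str.slice model_name_to_match none (some ((k + 1 : Nat) : Int))
    if PySem.Set.contains candidates prefixStr then prefixStr
    else fbmsAltGo model_name_to_match candidates k

def find_best_matching_string_alt (model_name_to_match : String) (model_names_to_check : List String) : String :=
  fbmsAltGo model_name_to_match (PySem.Set.ofList model_names_to_check) (PySem.Str.len model_name_to_match).toNat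

-- ===== PRECONDITION & SPEC =====
def Spec_find_best_matching_string (model_name_to_match : String) (model_names_to_check : List String) (out : String) : Prop := out = find_best_matching_string_alt model_name_to_match model_names_to_check
instance (model_name_to_match : String) (model_names_to_check : List String) (out : String) : Decidable (Spec_find_best_matching_string model_name_to_match model_names_to_check out) := by unfold Spec_find_best_matching_string; infer_instance

-- ===== CLAIM (what is proved, stated in full; the proofs are below) =====
def Claim_equal_find_best_matching_string : Prop := ∀ (model_name_to_match : String) (model_names_to_check : List String), Dom_find_best_matching_string model_name_to_match model_names_to_check → Spec_find_best_matching_string model_name_to_match model_names_to_check (find_best_matching_string model_name_to_match model_names_to_check)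

-- ===== LEMMAS AND PROOFS =====

-- r is "the" answer: a prefix of m, empty or a candidate, and at least as long as every candidate prefix
def pvGood (m : String) (cs : List String) (r : String) : Prop :=
  r.toList <+: m.toList ∧ (r = "" ∨ r ∈ cs) ∧
    ∀ c ∈ cs, c.toList <+: m.toList → c.toList.length ≤ r.toList.length

theorem pvStr_toList_inj {s t : String} (h : s.toList = t.toList) : s = t :=
  String.toList_inj.mp h

theorem pvPrefix_eq_take {l t : List Char} (h : l <+: t) : l = t.take l.length := by
  obtain ⟨u, hu⟩ := h
  subst hu
  simp

theorem pvGood_unique (m : String) (cs : List String) (r₁ r₂ : String)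
    (h₁ : pvGood m cs r₁) (h₂ : pvGood m cs r₂) : r₁ = r₂ := by
  obtain ⟨hp₁, hm₁, hl₁⟩ := h₁
  obtain ⟨hp₂, hm₂, hl₂⟩ := h₂
  have len₁ : r₁.toList.length ≤ r₂.toList.length := by
    rcases hm₁ with h | h
    · subst h; simp
    · exact hl₂ r₁ h hp₁
  have len₂ : r₂.toList.length ≤ r₁.toList.length := by
    rcases hm₂ with h | h
    · subst h; simp
    · exact hl₁ r₂ h hp₂
  have hlen : r₁.toList.length = r₂.toList.length := le_antisymm len₁ len₂
  apply pvStr_toList_inj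
  rw [pvPrefix_eq_take hp₁, pvPrefix_eq_take hp₂, hlen]

theorem pvFoldA (m : String) :
    ∀ (cs : List String) (b : String), b.toList <+: m.toList →
      (List.foldl
        (fun best_match candidate_model =>
          if PySem.Str.startswith m candidate_model
              && decide (PySem.Str.len best_match < PySem.Str.len candidate_model)
          then candidate_model else best_match) b cs).toList <+: m.toList ∧
      ((List.foldl
        (fun best_match candidate_model =>
          if PySem.Str.startswith m candidate_model
              && decide (PySem.Str.len best_match < PySem.Str.len candidate_model)
          then candidate_model else best_match) b cs) = b ∨
       (List.foldl
        (fun best_match candidate_model =>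
          if PySem.Str.startswith m candidate_model
              && decide (PySem.Str.len best_match < PySem.Str.len candidate_model)
          then candidate_model else best_match) b cs) ∈ cs) ∧
      b.toList.length ≤ (List.foldl
        (fun best_match candidate_model =>
          if PySem.Str.startswith m candidate_model
              && decide (PySem.Str.len best_match < PySem.Str.len candidate_model)
          then candidate_model else best_match) b cs).toList.length ∧
      ∀ c ∈ cs, c.toList <+: m.toList → c.toList.length ≤ (List.foldl
        (fun best_match candidate_model =>
          if PySem.Str.startswith m candidate_model
              && decide (PySem.Str.len best_match < PySem.Str.len candidate_model)
          then candidate_model else best_match) b cs).toList.length := by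
  intro cs
  induction cs with
  | nil =>
    intro b hb
    refine ⟨hb, Or.inl rfl, le_refl _, ?_⟩
    intro c hc
    simp at hc
  | cons c0 rest ih =>
    intro b hb
    simp only [List.foldl_cons]
    by_cases hc : (PySem.Str.startswith m c0
        && decide (PySem.Str.len b < PySem.Str.len c0)) = true
    · rw [if_pos hc]
      obtain ⟨h1, h2⟩ := Bool.and_eq_true_iff.mp hc
      have hpre : c0.toList <+: m.toList := by
        rw [PySem.Str.startswith_eq] at h1
        exact (PySem.Chars.startswith_iff _ _).mp h1
      have hlt : b.toList.length < c0.toList.length := by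
        have := of_decide_eq_true h2
        simpa using this
      obtain ⟨P, M, L, F⟩ := ih c0 hpre
      refine ⟨P, ?_, le_trans (le_of_lt hlt) L, ?_⟩
      · rcases M with h | h
        · exact Or.inr (by rw [h]; exact List.mem_cons_self)
        · exact Or.inr (List.mem_cons_of_mem _ h)
      · intro c hcm hcp
        rcases List.mem_cons.mp hcm with h | h
        · subst h; exact L
        · exact F c h hcp
    · rw [if_neg hc]
      obtain ⟨P, M, L, F⟩ := ih b hb
      refine ⟨P, ?_, L, ?_⟩
      · rcases M with h | h
        · exact Or.inl h
        · exact Or.inr (List.mem_cons_of_mem _ h)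
      · intro c hcm hcp
        rcases List.mem_cons.mp hcm with h | h
        · subst h
          have h1 : PySem.Str.startswith m c = true := by
            rw [PySem.Str.startswith_eq]
            exact (PySem.Chars.startswith_iff _ _).mpr hcp
          have h2 : ¬ (PySem.Str.len b < PySem.Str.len c) := by
            intro hlt
            exact hc (Bool.and_eq_true_iff.mpr ⟨h1, decide_eq_true hlt⟩)
          have hle : c.toList.length ≤ b.toList.length := by
            have : PySem.Str.len c ≤ PySem.Str.len b := le_of_not_gt h2
            simpa using this
          exact le_trans hle L
        · exact F c h hcp

theorem pvGoodA (m : String) (cs : List String) :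
    pvGood m cs (find_best_matching_string m cs) := by
  obtain ⟨P, M, _, F⟩ := pvFoldA m cs "" (by simp)
  exact ⟨P, M, F⟩

theorem pvLoopB (m : String) (s : PySem.Set String) :
    ∀ (k : Nat), k ≤ m.toList.length →
      (∀ c ∈ s, c.toList <+: m.toList → c.toList.length ≤ k) →
      (fbmsAltGo m s k).toList <+: m.toList ∧
      ((fbmsAltGo m s k) = "" ∨ (fbmsAltGo m s k) ∈ s) ∧
      ∀ c ∈ s, c.toList <+: m.toList → c.toList.length ≤ (fbmsAltGo m s k).toList.length := by
  intro k
  induction k with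
  | zero =>
    intro _ H
    have hp0 : PySem.Str.slice m none (some ((0 : Nat) : Int)) = "" := by
      apply pvStr_toList_inj
      simp
      rw [show (0 : Int) = ((0 : Nat) : Int) from rfl, PySem.List.slice_to_natCast]
      simp
    simp only [fbmsAltGo, hp0]
    have hres : (if PySem.Set.contains s "" then ("" : String) else "") = "" := by
      split <;> rfl
    rw [hres]
    refine ⟨by simp, Or.inl rfl, ?_⟩
    intro c hcs hcp
    simpa using H c hcs hcp
  | succ k ih =>
    intro hk H
    have hpt : (PySem.Str.slice m none (some ((k + 1 : Nat) : Int))).toList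
        = m.toList.take (k + 1) := by
      simp
      rw [show ((k : Int) + 1) = ((k + 1 : Nat) : Int) by push_cast; ring,
        PySem.List.slice_to_natCast]
    simp only [fbmsAltGo]
    by_cases hcon : PySem.Set.contains s (PySem.Str.slice m none (some ((k + 1 : Nat) : Int))) = true
    · rw [if_pos hcon]
      have hlen : (m.toList.take (k + 1)).length = k + 1 := by
        rw [List.length_take]
        omega
      refine ⟨by rw [hpt]; exact List.take_prefix _ _,
        Or.inr ((PySem.Set.contains_iff _ _).mp hcon), ?_⟩
      intro c hcs hcp
      rw [hpt, hlen]
      exact H c hcs hcp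
    · rw [if_neg hcon]
      apply ih (Nat.le_of_succ_le hk)
      intro c hcs hcp
      have hle : c.toList.length ≤ k + 1 := H c hcs hcp
      by_cases hE : c.toList.length = k + 1
      · exfalso
        have hceq : c = PySem.Str.slice m none (some ((k + 1 : Nat) : Int)) := by
          apply pvStr_toList_inj
          rw [hpt, ← hE]
          exact pvPrefix_eq_take hcp
        exact hcon ((PySem.Set.contains_iff _ _).mpr (hceq ▸ hcs))
      · omega

theorem pvGoodB (m : String) (cs : List String) :
    pvGood m cs (find_best_matching_string_alt m cs) := by
  have hlen : (PySem.Str.len m).toNat = m.toList.length := by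
    simp
  unfold find_best_matching_string_alt
  rw [hlen]
  obtain ⟨P, M, F⟩ := pvLoopB m (PySem.Set.ofList cs) m.toList.length (le_refl _)
    (fun c _ hcp => hcp.length_le)
  refine ⟨P, ?_, ?_⟩
  · rcases M with h | h
    · exact Or.inl h
    · exact Or.inr ((PySem.Set.mem_ofList _ _).mp h)
  · intro c hcs hcp
    exact F c ((PySem.Set.mem_ofList _ _).mpr hcs) hcp

-- ===== VERDICT (by name: the statement is the Claim_ definition above) =====
theorem find_best_matching_string_spec : Claim_equal_find_best_matching_string := by
  intro m cs _
  unfold Spec_find_best_matching_string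
  exact pvGood_unique m cs _ _ (pvGoodA m cs) (pvGoodB m cs)
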